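-- pv_equiv track=rewrite | github.com/lauren-h-yoon/cherry | knowledge_distillation.py | distill_objects
-- ===== SOURCE A (Python) =====
-- from typing import List, Dict, Any, Optional
--
-- def are_similar_objects(obj1: str, obj2: str) -> bool:
--     """
--     Check if two object strings refer to the same thing.
--     e.g. "white lamp" and "floor lamp" and "lamp" are all similar.
--     Simple word-overlap heuristic — good enough for demo.
--     """
--     words1 = set(obj1.lower().split())
--     words2 = set(obj2.lower().split())
--
--     # Remove common adjectives that don't identify the object
--     stopwords = {"a", "an", "the", "large", "small", "big", "little",
--                  "old", "new", "wooden", "metal", "white", "black",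
--                  "red", "blue", "green", "brown", "dark", "light"}
--
--     core1 = words1 - stopwords
--     core2 = words2 - stopwords
--
--     if not core1 or not core2:
--         return False
--
--     # If core nouns overlap, treat as same object
--     return bool(core1 & core2)
--
-- def distill_objects(
--     all_objects_per_chunk: List[List[str]]
-- ) -> Dict[str, int]:
--     """
--     Merge object lists from all chunks into one deduplicated dict.
--     Returns {canonical_object_name: mention_count}
--
--     This is the core DISTILLATION step:
--     - "lamp", "floor lamp", "white lamp" → "floor lamp" (most specific wins)
--     - mention count tracks how often each object appears across chunks
--     """
--     # Flatten all objects with their chunk source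
--     all_objects = []
--     for chunk_objects in all_objects_per_chunk:
--         all_objects.extend(chunk_objects)
--
--     if not all_objects:
--         return {}
--
--     # Group similar objects together
--     groups: List[List[str]] = []
--     assigned = [False] * len(all_objects)
--
--     for i, obj in enumerate(all_objects):
--         if assigned[i]:
--             continue
--         group = [obj]
--         assigned[i] = True
--         for j, other_obj in enumerate(all_objects):
--             if not assigned[j] and are_similar_objects(obj, other_obj):
--                 group.append(other_obj)
--                 assigned[j] = True
--         groups.append(group)
--
--     # Pick canonical name = longest (most specific) name in group
--     distilled = {}
--     for group in groups:
--         canonical = max(group, key=lambda x: len(x.split()))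
--         distilled[canonical] = len(group)  # mention count
--
--     return distilled
-- ===== SOURCE B (Python) =====
-- def distill_objects(all_objects_per_chunk):
--     stopwords = {"a", "an", "the", "large", "small", "big", "little",
--                  "old", "new", "wooden", "metal", "white", "black",
--                  "red", "blue", "green", "brown", "dark", "light"}
--     # single pass, first-fit: each group keeps its seed's core word-set (computed once)
--     groups = []  # [seed_core_set, member_list]
--     for chunk_objects in all_objects_per_chunk:
--         for obj in chunk_objects:
--             core = set(obj.lower().split()) - stopwords
--             for g in groups:
--                 if core and g[0] and not core.isdisjoint(g[0]):
--                     g[1].append(obj)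
--                     break
--             else:
--                 groups.append([core, [obj]])
--     distilled = {}
--     for _, members in groups:
--         canonical = max(members, key=lambda x: len(x.split()))
--         distilled[canonical] = len(members)
--     return distilled
-- ===== Notes on version B (the rewrite author's own statement) =====
-- stated objective: faster
-- what changed: Replaces A's two-phase grouping (boolean assigned array with a full rescan of all objects per seed, recomputing every lower/split/set pair on each comparison, then a separate max pass) by a single streaming first-fit pass that computes each object's core word-set exactly once, stores the seed's core with its group, and stops at the first matching group.
import Mathlib
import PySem

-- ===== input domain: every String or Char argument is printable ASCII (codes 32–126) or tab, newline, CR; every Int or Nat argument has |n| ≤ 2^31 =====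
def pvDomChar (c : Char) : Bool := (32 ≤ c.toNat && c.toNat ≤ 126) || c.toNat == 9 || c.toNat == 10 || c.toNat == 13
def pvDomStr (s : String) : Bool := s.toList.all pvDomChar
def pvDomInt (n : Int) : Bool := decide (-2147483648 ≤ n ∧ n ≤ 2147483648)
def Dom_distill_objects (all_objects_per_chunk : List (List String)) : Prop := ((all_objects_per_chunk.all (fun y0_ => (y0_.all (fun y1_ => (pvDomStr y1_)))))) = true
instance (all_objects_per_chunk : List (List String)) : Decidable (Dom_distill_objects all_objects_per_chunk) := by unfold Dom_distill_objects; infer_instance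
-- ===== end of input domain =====

-- B replaces A's quadratic flag-array grouping (seed scan + full rescan per seed, recomputing each
-- word-set O(n^2) times) by a single first-fit pass that stores each group's seed core word-set once.


-- the stopword literal both Python functions spell out
def pvStopwords : List String :=
  ["a", "an", "the", "large", "small", "big", "little",
   "old", "new", "wooden", "metal", "white", "black",
   "red", "blue", "green", "brown", "dark", "light"]

-- ===== PORT A =====
def are_similar_objects (obj1 obj2 : String) : Bool :=
  let words1 := PySem.Set.ofList (PySem.Str.split₀ (PySem.Str.lower obj1))
  let words2 := PySem.Set.ofList (PySem.Str.split₀ (PySem.Str.lower obj2))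
  let stopwords := PySem.Set.ofList pvStopwords
  let core1 := PySem.Set.diff words1 stopwords
  let core2 := PySem.Set.diff words2 stopwords
  if core1.isEmpty || core2.isEmpty then false
  else !(PySem.Set.inter core1 core2).isEmpty

def distill_objects (all_objects_per_chunk : List (List String)) : List (String × Int) :=
  let all_objects := all_objects_per_chunk.foldl (fun acc chunk_objects => acc ++ chunk_objects) []
  if all_objects.isEmpty then [] else
  let st := (PySem.List.enumerate all_objects 0).foldl
    (fun (st : List Bool × List (List String)) p =>
      if PySem.List.pyGetD st.1 p.1 false then st
      else
        let assigned1 := PySem.List.pySetD st.1 p.1 true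
        let inner := (PySem.List.enumerate all_objects 0).foldl
          (fun (st2 : List Bool × List String) q =>
            if !(PySem.List.pyGetD st2.1 q.1 false) && are_similar_objects p.2 q.2 then
              (PySem.List.pySetD st2.1 q.1 true, st2.2 ++ [q.2])
            else st2)
          (assigned1, [p.2])
        (inner.1, st.2 ++ [inner.2]))
    (List.replicate all_objects.length false, [])
  let distilled := st.2.foldl
    (fun (d : PySem.Dict String Int) group =>
      match PySem.List.max? group (fun x => (PySem.Str.split₀ x).length) with
      | some canonical => d.insert canonical (group.length : Int)
      | none => d)   -- unreachable: every group is nonempty (Python max would raise on [])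
    PySem.Dict.empty
  distilled.items

-- ===== PORT B =====
-- B: core word-set of one object, computed once
def pvCore (obj : String) : PySem.Set String :=
  PySem.Set.diff (PySem.Set.ofList (PySem.Str.split₀ (PySem.Str.lower obj))) (PySem.Set.ofList pvStopwords)

-- B's inner 'for g in groups: … break / else: append' loop
def pvFirstFit (core : PySem.Set String) (obj : String) :
    List (PySem.Set String × List String) → List (PySem.Set String × List String)
  | [] => [(core, [obj])]
  | g :: gs =>
      if !core.isEmpty && !g.1.isEmpty && !(PySem.Set.isdisjoint core g.1) then
        (g.1, g.2 ++ [obj]) :: gs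
      else
        g :: pvFirstFit core obj gs

def distill_objects_alt (all_objects_per_chunk : List (List String)) : List (String × Int) :=
  let groups := all_objects_per_chunk.foldl
    (fun gs chunk_objects => chunk_objects.foldl (fun gs obj => pvFirstFit (pvCore obj) obj gs) gs) []
  (groups.foldl
    (fun (d : PySem.Dict String Int) g =>
      match PySem.List.max? g.2 (fun x => (PySem.Str.split₀ x).length) with
      | some canonical => d.insert canonical (g.2.length : Int)
      | none => d)
    PySem.Dict.empty).items

-- ===== PRECONDITION & SPEC =====
def Spec_distill_objects (all_objects_per_chunk : List (List String)) (out : List (String × Int)) : Prop := out = distill_objects_alt all_objects_per_chunk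
instance (all_objects_per_chunk : List (List String)) (out : List (String × Int)) : Decidable (Spec_distill_objects all_objects_per_chunk out) := by unfold Spec_distill_objects; infer_instance

-- ===== CLAIM (what is proved, stated in full; the proofs are below) =====
def Claim_equal_distill_objects : Prop := ∀ (all_objects_per_chunk : List (List String)), Dom_distill_objects all_objects_per_chunk → Spec_distill_objects all_objects_per_chunk (distill_objects all_objects_per_chunk)

-- ===== LEMMAS AND PROOFS =====

-- reference grouping: first element seeds a group collecting all later similar elements
def pvPart : List String → List (List String)
  | [] => []
  | x :: xs =>
      (x :: xs.filter (fun y => are_similar_objects x y)) ::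
      pvPart (xs.filter (fun y => !are_similar_objects x y))
termination_by l => l.length
decreasing_by
  simp only [List.length_cons, List.length_unattach] at *
  exact Nat.lt_succ_of_le (le_trans (List.length_filter_le _ _) (by simp))

-- A's similarity test written on two already-computed core sets
theorem pv_sim_gen (c1 c2 : PySem.Set String) :
    (!c2.isEmpty && !c1.isEmpty && !(PySem.Set.isdisjoint c2 c1))
      = (if c1.isEmpty || c2.isEmpty then false else !(PySem.Set.inter c1 c2).isEmpty) := by
  cases h1 : c1.isEmpty <;> cases h2 : c2.isEmpty <;> simp [*]
  rw [Bool.eq_iff_iff, PySem.Set.isdisjoint_iff, List.isEmpty_iff, List.eq_nil_iff_forall_not_mem]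
  constructor
  · intro h y hy
    exact h y ((PySem.Set.mem_inter _ _ _).mp hy).2 ((PySem.Set.mem_inter _ _ _).mp hy).1
  · intro h y h2 h1
    exact h y ((PySem.Set.mem_inter _ _ _).mpr ⟨h1, h2⟩)

-- B's first-fit test equals A's are_similar_objects
theorem pv_ff_sim (s x : String) :
    (!(pvCore x).isEmpty && !(pvCore s).isEmpty && !(PySem.Set.isdisjoint (pvCore x) (pvCore s)))
      = are_similar_objects s x := (pv_sim_gen (pvCore s) (pvCore x)).trans rfl

-- ---------- named pieces of A's port (definitionally equal to its lambdas) ----------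
def pvInnerStep (obj : String) (st2 : List Bool × List String) (q : Int × String) :
    List Bool × List String :=
  if !(PySem.List.pyGetD st2.1 q.1 false) && are_similar_objects obj q.2 then
    (PySem.List.pySetD st2.1 q.1 true, st2.2 ++ [q.2])
  else st2

def pvAStep (objs : List String) (st : List Bool × List (List String)) (p : Int × String) :
    List Bool × List (List String) :=
  if PySem.List.pyGetD st.1 p.1 false then st
  else
    let assigned1 := PySem.List.pySetD st.1 p.1 true
    let inner := (PySem.List.enumerate objs 0).foldl (pvInnerStep p.2) (assigned1, [p.2])
    (inner.1, st.2 ++ [inner.2])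

def pvDictStep (d : PySem.Dict String Int) (group : List String) : PySem.Dict String Int :=
  match PySem.List.max? group (fun x => (PySem.Str.split₀ x).length) with
  | some canonical => d.insert canonical (group.length : Int)
  | none => d

theorem distill_objects_eq (l : List (List String)) :
    distill_objects l =
      (if l.flatten.isEmpty then [] else
        ((((PySem.List.enumerate l.flatten 0).foldl (pvAStep l.flatten)
            (List.replicate l.flatten.length false, [])).2.foldl pvDictStep
          PySem.Dict.empty).items)) := by
  simp only [distill_objects, PySem.List.foldl_append_eq_flatten, List.nil_append]
  rfl

-- ---------- abstract first-fit insertion (seed, members) and its partition form ----------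
def pvIns (x : String) : List (String × List String) → List (String × List String)
  | [] => [(x, [x])]
  | (s, g) :: gs =>
      if are_similar_objects s x then (s, g ++ [x]) :: gs else (s, g) :: pvIns x gs

def pvPartAll : List (String × List String) → List String → List (List String)
  | [], l => pvPart l
  | (s, g) :: gs, l =>
      (g ++ l.filter (fun y => are_similar_objects s y)) ::
      pvPartAll gs (l.filter (fun y => !are_similar_objects s y))

theorem pvPartAll_nil (gs : List (String × List String)) :
    pvPartAll gs [] = gs.map (fun p => p.2) := by
  induction gs with
  | nil => simp [pvPartAll, pvPart]
  | cons g gs ih => cases g; simp [pvPartAll, ih]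

theorem pvPartAll_ins (x : String) (gs : List (String × List String)) (l : List String) :
    pvPartAll (pvIns x gs) l = pvPartAll gs (x :: l) := by
  induction gs generalizing l with
  | nil => simp [pvIns, pvPartAll, pvPart]
  | cons g gs ih =>
    obtain ⟨s, m⟩ := g
    by_cases h : are_similar_objects s x = true
    · simp [pvIns, pvPartAll, h]
    · simp only [Bool.not_eq_true] at h
      simp [pvIns, pvPartAll, h, ih]

theorem pv_foldl_ins (l : List String) (gs : List (String × List String)) :
    (l.foldl (fun gs x => pvIns x gs) gs).map (fun p => p.2) = pvPartAll gs l := by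
  induction l generalizing gs with
  | nil => simp [pvPartAll_nil]
  | cons x l ih => rw [List.foldl_cons, ih, pvPartAll_ins]

-- B's concrete loop is pvIns through the seed ↦ (core, members) abstraction
theorem pv_ff_map (x : String) (gs : List (String × List String)) :
    pvFirstFit (pvCore x) x (gs.map (fun p => (pvCore p.1, p.2)))
      = (pvIns x gs).map (fun p => (pvCore p.1, p.2)) := by
  induction gs with
  | nil => simp [pvFirstFit, pvIns]
  | cons g gs ih =>
    obtain ⟨s, m⟩ := g
    simp only [List.map_cons, pvFirstFit, pvIns, pv_ff_sim s x]
    by_cases h : are_similar_objects s x = true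
    · simp [h]
    · simp only [Bool.not_eq_true] at h
      simp [h, ih]

theorem pv_foldl_ff (l : List String) (gs : List (String × List String)) :
    l.foldl (fun gs obj => pvFirstFit (pvCore obj) obj gs) (gs.map (fun p => (pvCore p.1, p.2)))
      = (l.foldl (fun gs x => pvIns x gs) gs).map (fun p => (pvCore p.1, p.2)) := by
  induction l generalizing gs with
  | nil => simp
  | cons x l ih => rw [List.foldl_cons, List.foldl_cons, pv_ff_map, ih]

-- ---------- zip/filter bookkeeping for A's assigned array ----------
def pvUn (ps : List (Bool × String)) : List String := (ps.filter (fun p => !p.1)).map (fun p => p.2)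

theorem pvUn_filter (c : String → Bool) (ps : List (Bool × String)) :
    ((ps.filter (fun p => !p.1 && c p.2)).map (fun p => p.2)) = (pvUn ps).filter c := by
  induction ps with
  | nil => simp [pvUn]
  | cons p ps ih =>
    obtain ⟨b, o⟩ := p
    cases b <;> cases h : c o <;> simp_all [pvUn]

theorem pvUn_map_or (c : String → Bool) (ps : List (Bool × String)) :
    pvUn (ps.map (fun p => (p.1 || c p.2, p.2))) = (pvUn ps).filter (fun y => !c y) := by
  induction ps with
  | nil => simp [pvUn]
  | cons p ps ih =>
    obtain ⟨b, o⟩ := p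
    cases b <;> cases h : c o <;> simp_all [pvUn]

theorem pv_zip_zipWith (f : Bool → String → Bool) (bs : List Bool) (os : List String) :
    (List.zipWith f bs os).zip os = (bs.zip os).map (fun p => (f p.1 p.2, p.2)) := by
  induction bs generalizing os with
  | nil => simp
  | cons b bs ih =>
    cases os with
    | nil => simp
    | cons o os => simp [ih]

theorem pvUn_zip_replicate (os : List String) :
    pvUn ((List.replicate os.length false).zip os) = os := by
  induction os with
  | nil => simp [pvUn]
  | cons o os ih => simpa [pvUn, List.replicate_succ] using ih

-- ---------- A's inner loop ----------
theorem pv_inner (obj : String) (os : List String) :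
    ∀ (pre suf : List Bool) (g : List String), suf.length = os.length →
    (PySem.List.enumerate os (pre.length : Int)).foldl (pvInnerStep obj) (pre ++ suf, g)
      = (pre ++ List.zipWith (fun b o => b || are_similar_objects obj o) suf os,
         g ++ ((suf.zip os).filter (fun p => !p.1 && are_similar_objects obj p.2)).map (fun p => p.2)) := by
  induction os with
  | nil =>
    intro pre suf g h
    rw [List.length_eq_zero_iff.mp h]
    simp [PySem.List.enumerate]
  | cons o os ih =>
    intro pre suf g h
    cases suf with
    | nil => simp at h
    | cons b bs =>
      simp only [List.length_cons] at h
      rw [PySem.List.enumerate_cons, List.foldl_cons]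
      have hget : PySem.List.pyGetD (pre ++ b :: bs) ((pre.length : Nat) : Int) false = b := by
        rw [PySem.List.pyGetD_natCast]; simp [List.getD]
      have hset : PySem.List.pySetD (pre ++ b :: bs) ((pre.length : Nat) : Int) true = pre ++ true :: bs := by
        rw [PySem.List.pySetD_natCast]; simp
      by_cases hc : (!b && are_similar_objects obj o) = true
      · obtain ⟨hb, hs⟩ := Bool.and_eq_true_iff.mp hc
        simp only [Bool.not_eq_true'] at hb
        subst hb
        have hstep : pvInnerStep obj (pre ++ false :: bs, g) ((pre.length : Int), o)
            = (pre ++ true :: bs, g ++ [o]) := by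
          simp [pvInnerStep, hget, hset, hs]
        rw [hstep]
        have hidx : ((pre.length : Int) + 1) = (((pre ++ [true]).length : Nat) : Int) := by
          simp
        rw [List.append_cons pre true bs, hidx, ih (pre ++ [true]) bs (g ++ [o]) (Nat.succ_injective h)]
        simp [hs, List.append_assoc]
      · have hstep : pvInnerStep obj (pre ++ b :: bs, g) ((pre.length : Int), o)
            = (pre ++ b :: bs, g) := by
          simp only [pvInnerStep, hget]
          rw [if_neg (by simp_all)]
        rw [hstep]
        have hidx : ((pre.length : Int) + 1) = (((pre ++ [b]).length : Nat) : Int) := by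
          simp
        rw [List.append_cons pre b bs, hidx, ih (pre ++ [b]) bs g (Nat.succ_injective h)]
        have hor : (b || are_similar_objects obj o) = b := by
          cases b <;> simp_all
        simp [hor, hc, List.append_assoc]

-- ---------- A's outer loop ----------
theorem pv_outer (objs : List String) (os : List String) :
    ∀ (j : Nat) (asg : List Bool) (gs : List (List String)),
    asg.length = objs.length → os = objs.drop j →
    (∀ k, k < j → asg.getD k false = true) →
    ((PySem.List.enumerate os (j : Int)).foldl (pvAStep objs) (asg, gs)).2
      = gs ++ pvPart (pvUn ((asg.drop j).zip os)) := by
  induction os with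
  | nil => intro j asg gs _ _ _; simp [PySem.List.enumerate, pvUn, pvPart]
  | cons o os ih =>
    intro j asg gs hlen hdrop hpre
    have hjlt : j < objs.length := by
      by_contra hle
      rw [List.drop_eq_nil_of_le (Nat.le_of_not_lt hle)] at hdrop
      exact List.cons_ne_nil _ _ hdrop
    have hjasg : j < asg.length := by omega
    have hdropasg : asg.drop j = asg[j] :: asg.drop (j + 1) := List.drop_eq_getElem_cons hjasg
    have hcons : o :: os = objs[j] :: objs.drop (j + 1) :=
      hdrop.trans (List.drop_eq_getElem_cons hjlt)
    have ho : o = objs[j] := (List.cons.injEq _ _ _ _).mp hcons |>.1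
    have hos' : os = objs.drop (j + 1) := (List.cons.injEq _ _ _ _).mp hcons |>.2
    have hget : PySem.List.pyGetD asg ((j : Nat) : Int) false = asg[j] := by
      rw [PySem.List.pyGetD_natCast]
      exact List.getD_eq_getElem _ _ hjasg
    have hidx : ((j : Int) + 1) = (((j + 1 : Nat)) : Int) := by push_cast; ring
    rw [PySem.List.enumerate_cons, List.foldl_cons]
    by_cases hb : asg[j] = true
    · have hstep : pvAStep objs (asg, gs) ((j : Int), o) = (asg, gs) := by
        simp [pvAStep, hget, hb]
      rw [hstep, hidx, ih (j + 1) asg gs hlen hos'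
        (fun k hk => by
          rcases Nat.lt_or_ge k j with h | h
          · exact hpre k h
          · have : k = j := by omega
            subst this
            rw [List.getD_eq_getElem _ _ hjasg, hb])]
      rw [hdropasg]
      simp [pvUn, hb]
    · have hb' : asg[j] = false := by simpa using hb
      -- the inner rescan
      have hinner := pv_inner o objs [] (asg.set j true) [o] (by simp [hlen])
      simp only [List.nil_append, List.length_nil, Nat.cast_zero] at hinner
      have hstep : pvAStep objs (asg, gs) ((j : Int), o) =
          ((List.zipWith (fun b o_1 => b || are_similar_objects o o_1) (asg.set j true) objs),
           gs ++ [[o] ++ (((asg.set j true).zip objs).filter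
              (fun p => !p.1 && are_similar_objects o p.2)).map (fun p => p.2)]) := by
        simp only [pvAStep, hget, hb', Bool.false_eq_true, if_false, PySem.List.pySetD_natCast]
        rw [hinner]
      rw [hstep, hidx]
      set R := asg.drop (j + 1) with hR
      set U := pvUn (R.zip os) with hU
      -- the rescan's picks: prefix ≤ j is all assigned, the rest is U filtered by similarity
      have hsplitasg : asg.set j true = (asg.set j true).take (j + 1) ++ R := by
        rw [hR, ← List.drop_set_of_lt (Nat.lt_succ_self j)]
        exact (List.take_append_drop _ _).symm
      have hsplitobjs : objs = objs.take (j + 1) ++ os := by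
        rw [hos']
        exact (List.take_append_drop _ _).symm
      have hlentake : ((asg.set j true).take (j + 1)).length = (objs.take (j + 1)).length := by
        simp [hlen]
      have htaketrue : ∀ x ∈ (asg.set j true).take (j + 1), x = true := by
        intro x hx
        rw [List.mem_take_iff_getElem] at hx
        obtain ⟨k, hk, hkx⟩ := hx
        have hkl : k < asg.length := by simp at hk; omega
        rcases Nat.lt_or_ge k j with h | h
        · rw [List.getElem_set_ne (by omega)] at hkx
          have := hpre k h
          rw [List.getD_eq_getElem _ _ hkl] at this
          rw [← hkx, this]
        · have : k = j := by simp at hk; omega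
          subst this
          rw [List.getElem_set_self (by simpa using hjasg)] at hkx
          exact hkx.symm
      have hzip : (asg.set j true).zip objs
          = ((asg.set j true).take (j + 1)).zip (objs.take (j + 1)) ++ R.zip os := by
        conv_lhs => rw [hsplitasg, hsplitobjs]
        exact List.zip_append hlentake
      have hpicked : (((asg.set j true).zip objs).filter
            (fun p => !p.1 && are_similar_objects o p.2)).map (fun p => p.2)
          = U.filter (fun y => are_similar_objects o y) := by
        rw [hzip, List.filter_append]
        have hprefnil : ((((asg.set j true).take (j + 1)).zip (objs.take (j + 1))).filter
            (fun p => !p.1 && are_similar_objects o p.2)) = [] := by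
          rw [List.filter_eq_nil_iff]
          rintro ⟨a, b⟩ hp
          have ha := htaketrue a (List.of_mem_zip hp).1
          simp [ha]
        rw [hprefnil, List.nil_append, pvUn_filter]
      rw [hpicked]
      -- the new flag array seen from position j+1
      have hdropzip : (List.zipWith (fun b o_1 => b || are_similar_objects o o_1)
            (asg.set j true) objs).drop (j + 1)
          = List.zipWith (fun b o_1 => b || are_similar_objects o o_1) R os := by
        rw [List.drop_zipWith, List.drop_set_of_lt (Nat.lt_succ_self j), ← hos', hR]
      rw [ih (j + 1) _ _ (by simp [hlen]) hos'
        (fun k hk => by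
          have hk2 : k < (List.zipWith (fun b o_1 => b || are_similar_objects o o_1)
              (asg.set j true) objs).length := by simp; omega
          rw [List.getD_eq_getElem _ _ hk2, List.getElem_zipWith]
          rcases Nat.lt_or_ge k j with h | h
          · rw [List.getElem_set_ne (by omega)]
            have := hpre k h
            rw [List.getD_eq_getElem _ _ (by omega : k < asg.length)] at this
            simp [this]
          · have : k = j := by omega
            subst this
            rw [List.getElem_set_self (by simpa using hjasg)]
            simp)]
      rw [hdropzip, pv_zip_zipWith, pvUn_map_or, ← hU]
      rw [hdropasg, hb']
      have hUn : pvUn ((false :: R).zip (o :: os)) = o :: U := by simp [pvUn, hU]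
      rw [hUn]
      conv_rhs => rw [pvPart]
      simp [List.append_assoc]

theorem pv_a_groups (objs : List String) :
    ((PySem.List.enumerate objs 0).foldl (pvAStep objs)
        (List.replicate objs.length false, [])).2 = pvPart objs := by
  have h := pv_outer objs objs 0 (List.replicate objs.length false) []
    (by simp) (by simp) (fun k hk => absurd hk (Nat.not_lt_zero k))
  simpa [pvUn_zip_replicate] using h

-- B's dict-building fold only reads the member list of each group
theorem pv_dict_key (l' : List (String × List String)) :
    (l'.map (fun p => (pvCore p.1, p.2))).foldl
      (fun (d : PySem.Dict String Int) g =>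
        match PySem.List.max? g.2 (fun x => (PySem.Str.split₀ x).length) with
        | some canonical => d.insert canonical (g.2.length : Int)
        | none => d) PySem.Dict.empty
    = (l'.map (fun p => p.2)).foldl pvDictStep PySem.Dict.empty := by
  rw [List.foldl_map, List.foldl_map]
  rfl

theorem distill_objects_alt_eq (l : List (List String)) :
    distill_objects_alt l = ((pvPart l.flatten).foldl pvDictStep PySem.Dict.empty).items := by
  simp only [distill_objects_alt]
  rw [← List.foldl_flatten,
    show ([] : List (PySem.Set String × List String))
        = (([] : List (String × List String)).map (fun p => (pvCore p.1, p.2))) from rfl,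
    pv_foldl_ff, pv_dict_key, pv_foldl_ins]
  rfl

-- ===== VERDICT (by name: the statement is the Claim_ definition above) =====
theorem distill_objects_spec : Claim_equal_distill_objects := by
  unfold Claim_equal_distill_objects Spec_distill_objects
  intro l _
  rw [distill_objects_eq, distill_objects_alt_eq]
  by_cases h : l.flatten.isEmpty
  · rw [if_pos h, List.isEmpty_iff.mp h]
    simp [pvPart]
    rfl
  · rw [if_neg h, pv_a_groups]
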